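-- pv_equiv track=rewrite | github.com/junwang1234/code-agent-from-scratch | src/runtime/observation_analysis.py | summarize_tree
-- ===== SOURCE A (Python) =====
-- def summarize_tree(tree: list[str]) -> tuple[str, list[str]]:
--     if not tree:
--         return "Repository tree is empty.", ["No files or directories were returned."]
--     top_level_dirs = sorted({entry.rstrip("/") for entry in tree if entry.endswith("/") and "/" not in entry.rstrip("/")})
--     top_level_files = sorted({entry for entry in tree if not entry.endswith("/") and "/" not in entry})
--     summary_parts: list[str] = []
--     if top_level_dirs:
--         summary_parts.append("Top-level dirs: " + ", ".join(top_level_dirs[:6]))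
--     if top_level_files:
--         summary_parts.append("Root files: " + ", ".join(top_level_files[:6]))
--     if not summary_parts:
--         summary_parts.append("Tree contains nested entries but no root-level items were captured.")
--     highlights: list[str] = []
--     if top_level_dirs:
--         highlights.append(f"Primary directories: {', '.join(top_level_dirs[:4])}")
--     if top_level_files:
--         highlights.append(f"Primary root files: {', '.join(top_level_files[:4])}")
--     nested_files = [entry for entry in tree if not entry.endswith("/") and "/" in entry]
--     representative = representative_nested_files(nested_files)
--     if representative:
--         highlights.append("Representative nested files: " + ", ".join(representative))
--     return ". ".join(summary_parts) + ".", highlights[:4]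
--
-- def representative_nested_files(nested_files: list[str]) -> list[str]:
--     preferred = []
--     for needle in ("scripts/", "tests/", "references/"):
--         preferred.extend([path for path in nested_files if path.startswith(needle)])
--     ordered = []
--     for path in preferred + nested_files:
--         if path not in ordered:
--             ordered.append(path)
--     return ordered[:4]
-- ===== SOURCE B (Python) =====
-- # B: one classifying pass over the tree replaces A's six comprehension scans, and the
-- # representative nested files are chosen by a stable sort on a priority key instead of
-- # concatenating three prefix-filtered lists with the whole list and deduping by membership.
-- def _priority(path: str) -> int:
--     if path.startswith("scripts/"):
--         return 0
--     if path.startswith("tests/"):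
--         return 1
--     if path.startswith("references/"):
--         return 2
--     return 3
--
-- def summarize_tree(tree: list[str]) -> tuple[str, list[str]]:
--     if not tree:
--         return "Repository tree is empty.", ["No files or directories were returned."]
--     dirs, files, nested = [], [], []
--     for entry in tree:
--         if entry.endswith("/"):
--             name = entry.rstrip("/")
--             if "/" not in name:
--                 dirs.append(name)
--         elif "/" in entry:
--             nested.append(entry)
--         else:
--             files.append(entry)
--     top_level_dirs = sorted(set(dirs))
--     top_level_files = sorted(set(files))
--     summary_parts = []
--     if top_level_dirs:
--         summary_parts.append("Top-level dirs: " + ", ".join(top_level_dirs[:6]))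
--     if top_level_files:
--         summary_parts.append("Root files: " + ", ".join(top_level_files[:6]))
--     if not summary_parts:
--         summary_parts.append("Tree contains nested entries but no root-level items were captured.")
--     highlights = []
--     if top_level_dirs:
--         highlights.append("Primary directories: " + ", ".join(top_level_dirs[:4]))
--     if top_level_files:
--         highlights.append("Primary root files: " + ", ".join(top_level_files[:4]))
--     # The three needles are mutually exclusive prefixes, so a stable sort by priority
--     # reproduces A's ordering; dedup first (first occurrences) matches A's dedup.
--     representative = sorted(dict.fromkeys(nested), key=_priority)[:4]
--     if representative:
--         highlights.append("Representative nested files: " + ", ".join(representative))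
--     return ". ".join(summary_parts) + ".", highlights[:4]
-- ===== Notes on version B (the rewrite author's own statement) =====
-- stated objective: alternative
-- what changed: Representative nested files are now chosen by deduplicating once and stable-sorting by a 4-valued priority key (correct because the three needles are mutually exclusive prefixes and Python's sort is stable), replacing A's three prefix-filter passes concatenated with the whole list and deduplicated by repeated O(n) list-membership scans; the top-level classification is fused into one pass instead of six comprehension scans.
import Mathlib
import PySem

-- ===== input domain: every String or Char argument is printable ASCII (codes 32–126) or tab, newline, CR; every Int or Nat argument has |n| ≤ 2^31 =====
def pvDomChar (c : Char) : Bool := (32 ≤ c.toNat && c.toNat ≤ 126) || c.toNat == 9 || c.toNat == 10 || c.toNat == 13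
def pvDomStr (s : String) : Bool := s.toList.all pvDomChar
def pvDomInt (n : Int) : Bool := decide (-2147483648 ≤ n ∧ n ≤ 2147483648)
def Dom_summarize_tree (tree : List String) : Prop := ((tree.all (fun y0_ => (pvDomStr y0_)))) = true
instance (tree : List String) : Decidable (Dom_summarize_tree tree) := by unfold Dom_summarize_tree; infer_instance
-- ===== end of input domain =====

-- B classifies the tree in one pass and picks representative nested files by a stable sort
-- on a 4-valued priority key (dedup once, sort, take 4) instead of A's three prefix-filter
-- passes concatenated with the whole list and deduped by membership scans (alternative).

-- hand port of Python's s.rstrip("/") (exact: drops exactly the trailing '/' characters)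
def rstripSlash (s : String) : String :=
  String.ofList ((s.toList.reverse.dropWhile (fun c => c == '/')).reverse)

-- ===== PORT A =====
def representative_nested_files (nested_files : List String) : List String :=
  let preferred := ["scripts/", "tests/", "references/"].foldl
    (fun acc needle => acc ++ nested_files.filter (fun p => PySem.Str.startswith p needle)) []
  let ordered := (preferred ++ nested_files).foldl
    (fun acc p => if p ∈ acc then acc else acc ++ [p]) []
  ordered.take 4

def summarize_tree (tree : List String) : String × List String :=
  if tree = [] then
    ("Repository tree is empty.", ["No files or directories were returned."])
  else
    let top_level_dirs := PySem.List.sorted (PySem.Set.ofList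
      ((tree.filter (fun e => PySem.Str.endswith e "/" && !(PySem.Str.isIn "/" (rstripSlash e)))).map rstripSlash)) (fun x => x)
    let top_level_files := PySem.List.sorted (PySem.Set.ofList
      (tree.filter (fun e => !(PySem.Str.endswith e "/") && !(PySem.Str.isIn "/" e)))) (fun x => x)
    let summary_parts : List String := []
    let summary_parts := if top_level_dirs ≠ [] then
      summary_parts ++ ["Top-level dirs: " ++ PySem.Str.join ", " (top_level_dirs.take 6)] else summary_parts
    let summary_parts := if top_level_files ≠ [] then
      summary_parts ++ ["Root files: " ++ PySem.Str.join ", " (top_level_files.take 6)] else summary_parts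
    let summary_parts := if summary_parts = [] then
      summary_parts ++ ["Tree contains nested entries but no root-level items were captured."] else summary_parts
    let highlights : List String := []
    let highlights := if top_level_dirs ≠ [] then
      highlights ++ ["Primary directories: " ++ PySem.Str.join ", " (top_level_dirs.take 4)] else highlights
    let highlights := if top_level_files ≠ [] then
      highlights ++ ["Primary root files: " ++ PySem.Str.join ", " (top_level_files.take 4)] else highlights
    let nested_files := tree.filter (fun e => !(PySem.Str.endswith e "/") && PySem.Str.isIn "/" e)
    let representative := representative_nested_files nested_files
    let highlights := if representative ≠ [] then
      highlights ++ ["Representative nested files: " ++ PySem.Str.join ", " representative] else highlights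
    (PySem.Str.join ". " summary_parts ++ ".", highlights.take 4)

-- ===== PORT B =====
-- port of Source B's _priority
def priority (path : String) : Int :=
  if PySem.Str.startswith path "scripts/" then 0
  else if PySem.Str.startswith path "tests/" then 1
  else if PySem.Str.startswith path "references/" then 2
  else 3

def classifyEntries (tree : List String) : List String × List String × List String :=
  tree.foldl (fun acc e =>
    if PySem.Str.endswith e "/" then
      let name := rstripSlash e
      if PySem.Str.isIn "/" name then acc
      else (acc.1 ++ [name], acc.2.1, acc.2.2)
    else if PySem.Str.isIn "/" e then (acc.1, acc.2.1, acc.2.2 ++ [e])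
    else (acc.1, acc.2.1 ++ [e], acc.2.2)) ([], [], [])

def summarize_tree_alt (tree : List String) : String × List String :=
  if tree = [] then
    ("Repository tree is empty.", ["No files or directories were returned."])
  else
    let c := classifyEntries tree
    let top_level_dirs := PySem.List.sorted (PySem.Set.ofList c.1) (fun x => x)
    let top_level_files := PySem.List.sorted (PySem.Set.ofList c.2.1) (fun x => x)
    let summary_parts : List String := []
    let summary_parts := if top_level_dirs ≠ [] then
      summary_parts ++ ["Top-level dirs: " ++ PySem.Str.join ", " (top_level_dirs.take 6)] else summary_parts
    let summary_parts := if top_level_files ≠ [] then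
      summary_parts ++ ["Root files: " ++ PySem.Str.join ", " (top_level_files.take 6)] else summary_parts
    let summary_parts := if summary_parts = [] then
      summary_parts ++ ["Tree contains nested entries but no root-level items were captured."] else summary_parts
    let highlights : List String := []
    let highlights := if top_level_dirs ≠ [] then
      highlights ++ ["Primary directories: " ++ PySem.Str.join ", " (top_level_dirs.take 4)] else highlights
    let highlights := if top_level_files ≠ [] then
      highlights ++ ["Primary root files: " ++ PySem.Str.join ", " (top_level_files.take 4)] else highlights
    let representative := (PySem.List.sorted (PySem.List.dedup c.2.2) priority).take 4
    let highlights := if representative ≠ [] then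
      highlights ++ ["Representative nested files: " ++ PySem.Str.join ", " representative] else highlights
    (PySem.Str.join ". " summary_parts ++ ".", highlights.take 4)

-- ===== PRECONDITION & SPEC =====
def Spec_summarize_tree (tree : List String) (out : String × List String) : Prop := out = summarize_tree_alt tree
instance (tree : List String) (out : String × List String) : Decidable (Spec_summarize_tree tree out) := by unfold Spec_summarize_tree; infer_instance

-- ===== CLAIM (what is proved, stated in full; the proofs are below) =====
def Claim_equal_summarize_tree : Prop := ∀ (tree : List String), Dom_summarize_tree tree → Spec_summarize_tree tree (summarize_tree tree)

-- ===== LEMMAS AND PROOFS =====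

theorem classifyEntries_go (l : List String) (d f n : List String) :
    l.foldl (fun acc e =>
      if PySem.Str.endswith e "/" then
        let name := rstripSlash e
        if PySem.Str.isIn "/" name then acc
        else (acc.1 ++ [name], acc.2.1, acc.2.2)
      else if PySem.Str.isIn "/" e then (acc.1, acc.2.1, acc.2.2 ++ [e])
      else (acc.1, acc.2.1 ++ [e], acc.2.2)) (d, f, n) =
    (d ++ (l.filter (fun e => PySem.Str.endswith e "/" && !(PySem.Str.isIn "/" (rstripSlash e)))).map rstripSlash,
     f ++ l.filter (fun e => !(PySem.Str.endswith e "/") && !(PySem.Str.isIn "/" e)),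
     n ++ l.filter (fun e => !(PySem.Str.endswith e "/") && PySem.Str.isIn "/" e)) := by
  induction l generalizing d f n with
  | nil => simp
  | cons e l ih =>
    simp only [PySem.Str.endswith_eq, PySem.Str.isIn_eq] at ih
    simp at ih
    cases hE : PySem.Chars.endswith e.toList ['/'] with
    | true =>
      cases hI : PySem.Chars.isIn ['/'] (rstripSlash e).toList with
      | true => simp [List.foldl_cons, hE, hI, ih]
      | false => simp [List.foldl_cons, hE, hI, ih]
    | false =>
      cases hJ : PySem.Chars.isIn ['/'] e.toList with
      | true => simp [List.foldl_cons, hE, hJ, ih]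
      | false => simp [List.foldl_cons, hE, hJ, ih]

theorem classifyEntries_eq (tree : List String) :
    classifyEntries tree =
    ((tree.filter (fun e => PySem.Str.endswith e "/" && !(PySem.Str.isIn "/" (rstripSlash e)))).map rstripSlash,
     tree.filter (fun e => !(PySem.Str.endswith e "/") && !(PySem.Str.isIn "/" e)),
     tree.filter (fun e => !(PySem.Str.endswith e "/") && PySem.Str.isIn "/" e)) := by
  simpa using classifyEntries_go tree [] [] []

-- the three needles are mutually exclusive prefixes (none is a prefix of another)
theorem prefix_excl (p q : String) (s : String)
    (hpq : ¬ (p.toList <+: q.toList) ∧ ¬ (q.toList <+: p.toList))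
    (hp : PySem.Str.startswith s p = true) : PySem.Str.startswith s q = false := by
  by_contra h
  rw [Bool.not_eq_false] at h
  rw [PySem.Str.startswith_eq, PySem.Chars.startswith_iff] at hp h
  rcases List.prefix_or_prefix_of_prefix hp h with hc | hc
  · exact hpq.1 hc
  · exact hpq.2 hc

theorem excl01 (s : String) (h : PySem.Str.startswith s "tests/" = true) :
    PySem.Str.startswith s "scripts/" = false :=
  prefix_excl "tests/" "scripts/" s (by decide) h

theorem excl02 (s : String) (h : PySem.Str.startswith s "references/" = true) :
    PySem.Str.startswith s "scripts/" = false :=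
  prefix_excl "references/" "scripts/" s (by decide) h

theorem excl12 (s : String) (h : PySem.Str.startswith s "references/" = true) :
    PySem.Str.startswith s "tests/" = false :=
  prefix_excl "references/" "tests/" s (by decide) h

-- priority vs the three startswith tests, pointwise
theorem prio0_iff (p : String) :
    (decide (priority p = 0)) = PySem.Str.startswith p "scripts/" := by
  unfold priority
  cases hs : PySem.Str.startswith p "scripts/" with
  | true => simp
  | false =>
    cases ht : PySem.Str.startswith p "tests/" with
    | true => simp
    | false =>
      cases hr : PySem.Str.startswith p "references/" with
      | true => simp
      | false => simp

theorem prio1_iff (p : String) :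
    (decide (priority p = 1)) = PySem.Str.startswith p "tests/" := by
  unfold priority
  cases ht : PySem.Str.startswith p "tests/" with
  | true => rw [excl01 p ht]; simp
  | false =>
    cases hs : PySem.Str.startswith p "scripts/" with
    | true => simp
    | false =>
      cases hr : PySem.Str.startswith p "references/" with
      | true => simp
      | false => simp

theorem prio2_iff (p : String) :
    (decide (priority p = 2)) = PySem.Str.startswith p "references/" := by
  unfold priority
  cases hr : PySem.Str.startswith p "references/" with
  | true => rw [excl02 p hr, excl12 p hr]; simp
  | false =>
    cases hs : PySem.Str.startswith p "scripts/" with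
    | true => simp
    | false =>
      cases ht : PySem.Str.startswith p "tests/" with
      | true => simp
      | false => simp

theorem prio3_iff (p : String) :
    (decide (priority p = 3)) =
    (!(PySem.Str.startswith p "scripts/") && !(PySem.Str.startswith p "tests/") && !(PySem.Str.startswith p "references/")) := by
  unfold priority
  cases hs : PySem.Str.startswith p "scripts/" with
  | true => simp
  | false =>
    cases ht : PySem.Str.startswith p "tests/" with
    | true => simp
    | false =>
      cases hr : PySem.Str.startswith p "references/" with
      | true => simp
      | false => simp

-- A's hand-rolled dedup loop is the Set.add fold
theorem memfold_eq_addfold (l : List String) (acc : List String) :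
    l.foldl (fun acc p => if p ∈ acc then acc else acc ++ [p]) acc =
    l.foldl PySem.Set.add acc := by
  induction l generalizing acc with
  | nil => rfl
  | cons x l ih =>
    have : (if x ∈ acc then acc else acc ++ [x]) = PySem.Set.add acc x := by
      by_cases h : x ∈ acc
      · simp [PySem.Set.add, PySem.Set.contains, h]
      · simp [PySem.Set.add, PySem.Set.contains, h]
    simp only [List.foldl_cons, this, ih]

theorem mem_addfold (l : List String) (acc : List String) (x : String) (h : x ∈ acc) :
    x ∈ l.foldl PySem.Set.add acc := by
  induction l generalizing acc with
  | nil => exact h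
  | cons y l ih =>
    refine ih _ ?_
    by_cases hy : y ∈ acc
    · simpa [PySem.Set.add, PySem.Set.contains, hy]
    · simp [PySem.Set.add, PySem.Set.contains, hy, h]

theorem mem_addfold_of_mem (l : List String) (acc : List String) (x : String) (h : x ∈ l) :
    x ∈ l.foldl PySem.Set.add acc := by
  induction l generalizing acc with
  | nil => cases h
  | cons y l ih =>
    rcases List.mem_cons.mp h with rfl | h'
    · refine mem_addfold l (PySem.Set.add acc x) x ?_
      unfold PySem.Set.add
      by_cases hy : x ∈ acc
      · simp [hy]
      · simp [hy]
    · exact ih _ h'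

theorem addfold_filter (q : String → Bool) (l : List String) (acc : List String)
    (h : ∀ x ∈ l, q x = false → x ∈ acc) :
    l.foldl PySem.Set.add acc = (l.filter q).foldl PySem.Set.add acc := by
  induction l generalizing acc with
  | nil => rfl
  | cons x l ih =>
    cases hq : q x with
    | true =>
      simp only [List.filter_cons, hq, if_true, List.foldl_cons]
      refine ih _ ?_
      intro y hy hqy
      have := h y (List.mem_cons_of_mem _ hy) hqy
      by_cases hx : x ∈ acc
      · simpa [PySem.Set.add, PySem.Set.contains, hx]
      · simp [PySem.Set.add, PySem.Set.contains, hx, this]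
    | false =>
      have hx : x ∈ acc := h x (List.mem_cons_self ..) hq
      have hadd : PySem.Set.add acc x = acc := by
        simp [PySem.Set.add, PySem.Set.contains, hx]
      simp only [List.filter_cons, hq, List.foldl_cons, hadd]
      exact ih _ (fun y hy hqy => h y (List.mem_cons_of_mem _ hy) hqy)

-- a fold of Set.add over elements disjoint from a prefix a of the accumulator skips a
theorem addfold_append (v : List String) (a b : List String) (h : ∀ x ∈ v, x ∉ a) :
    v.foldl PySem.Set.add (a ++ b) = a ++ v.foldl PySem.Set.add b := by
  induction v generalizing b with
  | nil => rfl
  | cons x v ih =>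
    have hx : x ∉ a := h x (List.mem_cons_self ..)
    have : PySem.Set.add (a ++ b) x = a ++ PySem.Set.add b x := by
      by_cases hb : x ∈ b
      · simp [PySem.Set.add, PySem.Set.contains, hb, hx]
      · simp [PySem.Set.add, PySem.Set.contains, hb, hx, List.append_assoc]
    simp only [List.foldl_cons, this]
    exact ih _ (fun y hy => h y (List.mem_cons_of_mem _ hy))

theorem dedup_eq_addfold (l : List String) :
    PySem.List.dedup l = l.foldl PySem.Set.add [] := by
  rw [PySem.List.dedup_eq_ofList, PySem.Set.ofList_eq_foldl]

theorem addfold_disj (v : List String) (a : List String) (h : ∀ x ∈ v, x ∉ a) :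
    v.foldl PySem.Set.add a = a ++ PySem.List.dedup v := by
  rw [dedup_eq_addfold]
  simpa using addfold_append v a [] h

-- dedup commutes with filter
theorem filter_addfold (p : String → Bool) (l : List String) (acc : List String) :
    (l.foldl PySem.Set.add acc).filter p = (l.filter p).foldl PySem.Set.add (acc.filter p) := by
  induction l generalizing acc with
  | nil => rfl
  | cons x l ih =>
    cases hp : p x with
    | true =>
      have : (PySem.Set.add acc x).filter p = PySem.Set.add (acc.filter p) x := by
        by_cases hx : x ∈ acc
        · have : x ∈ acc.filter p := List.mem_filter.mpr ⟨hx, hp⟩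
          simp [PySem.Set.add, PySem.Set.contains, hx, this]
        · have : x ∉ acc.filter p := fun hc => hx (List.mem_filter.mp hc).1
          simp [PySem.Set.add, PySem.Set.contains, hx, this, List.filter_append, hp]
      simp only [List.foldl_cons, List.filter_cons, hp, if_true, ih, this]
    | false =>
      have : (PySem.Set.add acc x).filter p = acc.filter p := by
        by_cases hx : x ∈ acc
        · simp [PySem.Set.add, PySem.Set.contains, hx]
        · simp [PySem.Set.add, PySem.Set.contains, hx, List.filter_append, hp]
      simp [List.foldl_cons, hp, ih, this]

theorem dedup_filter (p : String → Bool) (l : List String) :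
    (PySem.List.dedup l).filter p = PySem.List.dedup (l.filter p) := by
  rw [dedup_eq_addfold, dedup_eq_addfold]
  simpa using filter_addfold p l []

-- insertBy passes over a block whose elements never trigger `before`
theorem insertBy_append_left (before : String → String → Bool) (x : String)
    (l1 l2 : List String) (h : ∀ y ∈ l1, before x y = false) :
    PySem.List.insertBy before x (l1 ++ l2) = l1 ++ PySem.List.insertBy before x l2 := by
  induction l1 with
  | nil => rfl
  | cons y l1 ih =>
    have hy : before x y = false := h y (List.mem_cons_self ..)
    cases l1 with
    | nil =>
      cases l2 with
      | nil => simp [PySem.List.insertBy, hy]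
      | cons z l2 => simp [PySem.List.insertBy, hy]
    | cons w l1 =>
      have := ih (fun z hz => h z (List.mem_cons_of_mem _ hz))
      simp [List.cons_append, PySem.List.insertBy, hy] at this ⊢
      rw [this]

-- insertBy prepends when the head already triggers `before`
theorem insertBy_cons_all (before : String → String → Bool) (x : String)
    (l : List String) (h : ∀ y ∈ l, before x y = true) :
    PySem.List.insertBy before x l = x :: l := by
  cases l with
  | nil => rfl
  | cons y l => simp [PySem.List.insertBy, h y (List.mem_cons_self ..)]

-- stable insertion sort on a 4-valued priority key = the four priority groups in order
theorem sorted_prio_go (l : List String) (a0 a1 a2 a3 : List String)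
    (h0 : ∀ y ∈ a0, priority y = 0) (h1 : ∀ y ∈ a1, priority y = 1)
    (h2 : ∀ y ∈ a2, priority y = 2) (h3 : ∀ y ∈ a3, priority y = 3) :
    l.foldl (fun acc x => PySem.List.insertBy (fun a b => decide (priority a < priority b)) x acc)
      (a0 ++ (a1 ++ (a2 ++ a3))) =
    (a0 ++ l.filter (fun p => decide (priority p = 0))) ++
    ((a1 ++ l.filter (fun p => decide (priority p = 1))) ++
     ((a2 ++ l.filter (fun p => decide (priority p = 2))) ++
      (a3 ++ l.filter (fun p => decide (priority p = 3))))) := by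
  induction l generalizing a0 a1 a2 a3 with
  | nil => simp
  | cons x l ih =>
    have hprio : priority x = 0 ∨ priority x = 1 ∨ priority x = 2 ∨ priority x = 3 := by
      unfold priority; split_ifs <;> simp
    rcases hprio with hk | hk | hk | hk
    · have hins : PySem.List.insertBy (fun a b => decide (priority a < priority b)) x
          (a0 ++ (a1 ++ (a2 ++ a3))) = (a0 ++ [x]) ++ (a1 ++ (a2 ++ a3)) := by
        rw [insertBy_append_left _ _ a0 _ (by intro y hy; simp [hk, h0 y hy])]
        rw [insertBy_cons_all _ _ _ (by
          intro y hy
          rcases List.mem_append.mp hy with hy | hy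
          · simp [hk, h1 y hy]
          · rcases List.mem_append.mp hy with hy | hy
            · simp [hk, h2 y hy]
            · simp [hk, h3 y hy])]
        simp
      rw [List.foldl_cons, hins]
      rw [ih (a0 ++ [x]) a1 a2 a3
        (by intro y hy; rcases List.mem_append.mp hy with hy | hy
            · exact h0 y hy
            · simpa [List.mem_singleton.mp hy] using hk) h1 h2 h3]
      simp [hk, List.append_assoc]
    · have hins : PySem.List.insertBy (fun a b => decide (priority a < priority b)) x
          (a0 ++ (a1 ++ (a2 ++ a3))) = a0 ++ ((a1 ++ [x]) ++ (a2 ++ a3)) := by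
        rw [insertBy_append_left _ _ a0 _ (by intro y hy; simp [hk, h0 y hy])]
        rw [insertBy_append_left _ _ a1 _ (by intro y hy; simp [hk, h1 y hy])]
        rw [insertBy_cons_all _ _ _ (by
          intro y hy
          rcases List.mem_append.mp hy with hy | hy
          · simp [hk, h2 y hy]
          · simp [hk, h3 y hy])]
        simp
      rw [List.foldl_cons, hins]
      rw [ih a0 (a1 ++ [x]) a2 a3 h0
        (by intro y hy; rcases List.mem_append.mp hy with hy | hy
            · exact h1 y hy
            · simpa [List.mem_singleton.mp hy] using hk) h2 h3]
      simp [hk, List.append_assoc]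
    · have hins : PySem.List.insertBy (fun a b => decide (priority a < priority b)) x
          (a0 ++ (a1 ++ (a2 ++ a3))) = a0 ++ (a1 ++ ((a2 ++ [x]) ++ a3)) := by
        rw [insertBy_append_left _ _ a0 _ (by intro y hy; simp [hk, h0 y hy])]
        rw [insertBy_append_left _ _ a1 _ (by intro y hy; simp [hk, h1 y hy])]
        rw [insertBy_append_left _ _ a2 _ (by intro y hy; simp [hk, h2 y hy])]
        rw [insertBy_cons_all _ _ _ (by intro y hy; simp [hk, h3 y hy])]
        simp
      rw [List.foldl_cons, hins]
      rw [ih a0 a1 (a2 ++ [x]) a3 h0 h1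
        (by intro y hy; rcases List.mem_append.mp hy with hy | hy
            · exact h2 y hy
            · simpa [List.mem_singleton.mp hy] using hk) h3]
      simp [hk, List.append_assoc]
    · have hins : PySem.List.insertBy (fun a b => decide (priority a < priority b)) x
          (a0 ++ (a1 ++ (a2 ++ a3))) = a0 ++ (a1 ++ (a2 ++ (a3 ++ [x]))) := by
        rw [insertBy_append_left _ _ a0 _ (by intro y hy; simp [hk, h0 y hy])]
        rw [insertBy_append_left _ _ a1 _ (by intro y hy; simp [hk, h1 y hy])]
        rw [insertBy_append_left _ _ a2 _ (by intro y hy; simp [hk, h2 y hy])]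
        rw [PySem.List.insertBy_of_forall_not_before _ _ _ (by intro y hy; simp [hk, h3 y hy])]
      rw [List.foldl_cons, hins]
      rw [ih a0 a1 a2 (a3 ++ [x]) h0 h1 h2
        (by intro y hy; rcases List.mem_append.mp hy with hy | hy
            · exact h3 y hy
            · simpa [List.mem_singleton.mp hy] using hk)]
      simp [hk, List.append_assoc]

theorem sorted_prio_groups (d : List String) :
    PySem.List.sorted d priority =
    d.filter (fun p => decide (priority p = 0)) ++
    (d.filter (fun p => decide (priority p = 1)) ++
     (d.filter (fun p => decide (priority p = 2)) ++
      d.filter (fun p => decide (priority p = 3)))) := by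
  rw [PySem.List.sorted_eq_foldl_insertBy]
  simpa using sorted_prio_go d [] [] [] []
    (by simp) (by simp) (by simp) (by simp)

-- the key reconciliation: A's representative list = B's representative list
theorem representative_eq (nested : List String) :
    representative_nested_files nested =
    (PySem.List.sorted (PySem.List.dedup nested) priority).take 4 := by
  set f0 := nested.filter (fun p => PySem.Str.startswith p "scripts/") with hf0
  set f1 := nested.filter (fun p => PySem.Str.startswith p "tests/") with hf1
  set f2 := nested.filter (fun p => PySem.Str.startswith p "references/") with hf2
  set q : String → Bool := fun p => !(PySem.Str.startswith p "scripts/") && !(PySem.Str.startswith p "tests/") && !(PySem.Str.startswith p "references/") with hq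
  -- B side: groups of the stable sort
  have hB : PySem.List.sorted (PySem.List.dedup nested) priority =
      PySem.List.dedup f0 ++ (PySem.List.dedup f1 ++ (PySem.List.dedup f2 ++ PySem.List.dedup (nested.filter q))) := by
    rw [sorted_prio_groups]
    rw [dedup_filter, dedup_filter, dedup_filter, dedup_filter]
    congr 1
    · congr 1; exact List.filter_congr (fun x _ => prio0_iff x)
    congr 1
    · congr 1; exact List.filter_congr (fun x _ => prio1_iff x)
    congr 1
    · congr 1; exact List.filter_congr (fun x _ => prio2_iff x)
    · congr 1; exact List.filter_congr (fun x _ => prio3_iff x)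
  -- A side
  unfold representative_nested_files
  simp only [List.foldl_cons, List.foldl_nil, List.nil_append]
  rw [memfold_eq_addfold]
  rw [← hf0, ← hf1, ← hf2]
  -- replace the trailing full list by its q-filter
  have hsplit : (f0 ++ f1 ++ f2 ++ nested).foldl PySem.Set.add [] =
      nested.foldl PySem.Set.add ((f0 ++ (f1 ++ f2)).foldl PySem.Set.add []) := by
    simp [← List.foldl_append, List.append_assoc]
  have hA1 : (f0 ++ f1 ++ f2 ++ nested).foldl PySem.Set.add [] =
      ((f0 ++ (f1 ++ (f2 ++ nested.filter q)))).foldl PySem.Set.add [] := by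
    rw [hsplit]
    rw [addfold_filter q nested _ ?side]
    · simp [← List.foldl_append, List.append_assoc]
    case side =>
      intro x hx hqx
      apply mem_addfold_of_mem
      simp only [hq] at hqx
      by_cases h0 : PySem.Str.startswith x "scripts/" = true
      · exact List.mem_append_left _ (by rw [hf0, List.mem_filter]; exact ⟨hx, h0⟩)
      by_cases h1 : PySem.Str.startswith x "tests/" = true
      · refine List.mem_append_right _ (List.mem_append_left _ ?_)
        rw [hf1, List.mem_filter]; exact ⟨hx, h1⟩
      by_cases h2 : PySem.Str.startswith x "references/" = true
      · refine List.mem_append_right _ (List.mem_append_right _ ?_)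
        rw [hf2, List.mem_filter]; exact ⟨hx, h2⟩
      rw [Bool.not_eq_true] at h0 h1 h2
      rw [h0, h1, h2] at hqx
      simp at hqx
  rw [hA1, hB]
  congr 1
  -- split the fold over the disjoint groups
  have d01 : ∀ x ∈ f1 ++ (f2 ++ nested.filter q), x ∉ PySem.List.dedup f0 := by
    intro x hx hc
    have hx0 : PySem.Str.startswith x "scripts/" = true :=
      (List.mem_filter.mp ((PySem.List.mem_dedup ..).mp hc)).2
    rcases List.mem_append.mp hx with hx | hx
    · have := (List.mem_filter.mp hx).2
      rw [excl01 x this] at hx0; cases hx0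
    rcases List.mem_append.mp hx with hx | hx
    · have := (List.mem_filter.mp hx).2
      rw [excl02 x this] at hx0; cases hx0
    · have := (List.mem_filter.mp hx).2
      simp only [hq, Bool.and_eq_true, Bool.not_eq_true'] at this
      rw [this.1.1] at hx0; cases hx0
  have d12 : ∀ x ∈ f2 ++ nested.filter q, x ∉ PySem.List.dedup f1 := by
    intro x hx hc
    have hx1 : PySem.Str.startswith x "tests/" = true :=
      (List.mem_filter.mp ((PySem.List.mem_dedup ..).mp hc)).2
    rcases List.mem_append.mp hx with hx | hx
    · have := (List.mem_filter.mp hx).2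
      rw [excl12 x this] at hx1; cases hx1
    · have := (List.mem_filter.mp hx).2
      simp only [hq, Bool.and_eq_true, Bool.not_eq_true'] at this
      rw [this.1.2] at hx1; cases hx1
  have d23 : ∀ x ∈ nested.filter q, x ∉ PySem.List.dedup f2 := by
    intro x hx hc
    have hx2 : PySem.Str.startswith x "references/" = true :=
      (List.mem_filter.mp ((PySem.List.mem_dedup ..).mp hc)).2
    have := (List.mem_filter.mp hx).2
    simp only [hq, Bool.and_eq_true, Bool.not_eq_true'] at this
    rw [this.2] at hx2; cases hx2
  calc (f0 ++ (f1 ++ (f2 ++ nested.filter q))).foldl PySem.Set.add []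
      = (f1 ++ (f2 ++ nested.filter q)).foldl PySem.Set.add (PySem.List.dedup f0) := by
        rw [List.foldl_append, ← dedup_eq_addfold]
    _ = PySem.List.dedup f0 ++ (f1 ++ (f2 ++ nested.filter q)).foldl PySem.Set.add [] := by
        simpa [dedup_eq_addfold] using addfold_append (f1 ++ (f2 ++ nested.filter q)) (PySem.List.dedup f0) [] d01
    _ = PySem.List.dedup f0 ++ ((f2 ++ nested.filter q).foldl PySem.Set.add (PySem.List.dedup f1)) := by
        rw [List.foldl_append, ← dedup_eq_addfold]
    _ = PySem.List.dedup f0 ++ (PySem.List.dedup f1 ++ (f2 ++ nested.filter q).foldl PySem.Set.add []) := by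
        rw [addfold_disj _ _ d12]
        rw [dedup_eq_addfold (f2 ++ nested.filter q)]
    _ = PySem.List.dedup f0 ++ (PySem.List.dedup f1 ++ ((nested.filter q).foldl PySem.Set.add (PySem.List.dedup f2))) := by
        rw [List.foldl_append, ← dedup_eq_addfold]
    _ = PySem.List.dedup f0 ++ (PySem.List.dedup f1 ++ (PySem.List.dedup f2 ++ PySem.List.dedup (nested.filter q))) := by
        rw [addfold_disj _ _ d23]

-- ===== VERDICT (by name: the statement is the Claim_ definition above) =====
theorem summarize_tree_spec : Claim_equal_summarize_tree := by
  intro tree _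
  unfold Spec_summarize_tree summarize_tree summarize_tree_alt
  by_cases h : tree = []
  · simp [h]
  · simp only [if_neg h, classifyEntries_eq, representative_eq]
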